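-- pv_equiv track=rewrite | github.com/DrejcPesjak/DPhate-double-paraphrasing-hate-speech | remove_similar.py | para_diff
-- ===== SOURCE A (Python) =====
-- def str_equal(word1, word2):
-- 	'''
-- 	 count number of differences in two strings
-- 	'''
-- 	if word1!=word2:
-- 		count = sum(1 for a, b in zip(word1, word2) if a != b) + abs(len(word1) - len(word2))
-- 		return count
-- 	else:
-- 		return 0
--
-- def para_diff(lscomp):
-- 	'''
-- 	 return a list of pariwise correspondece indexes of sentences with less than three differences
-- 	'''
-- 	dif_c = [[] for x in range(len(lscomp))]
-- 	for i in range(0,len(lscomp)):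
-- 		for j in range(i+1,len(lscomp)):
-- 			c = str_equal(lscomp[i],lscomp[j])
-- 			if c <= 2:
-- 				dif_c[i].append(j)
-- 				dif_c[j].append(i)
-- 	return dif_c
-- ===== SOURCE B (Python) =====
-- def para_diff(lscomp):
-- 	'''
-- 	 return a list of pairwise correspondence indexes of sentences with less than three differences
-- 	'''
-- 	def _close(u, v):
-- 		# is the difference count at most 2?  (early exit as soon as it exceeds 2)
-- 		if u == v:
-- 			return True
-- 		d = abs(len(u) - len(v))
-- 		if d > 2:
-- 			return False
-- 		for a, b in zip(u, v):
-- 			if a != b: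
-- 				d += 1
-- 				if d > 2:
-- 					return False
-- 		return True
-- 	n = len(lscomp)
-- 	# index the sentences by length: a close pair's lengths differ by at most 2,
-- 	# so it suffices to pair each length-L bucket with the buckets L, L+1, L+2
-- 	buckets = {}
-- 	for j, s in enumerate(lscomp):
-- 		buckets.setdefault(len(s), []).append(j)
-- 	rows = [[] for _ in range(n)]
-- 	for L, bl in buckets.items():
-- 		m = len(bl)
-- 		for x in range(m):
-- 			i = bl[x]
-- 			wi = lscomp[i]
-- 			for y in range(x + 1, m):
-- 				j = bl[y]
-- 				if _close(wi, lscomp[j]):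
-- 					rows[i].append(j)
-- 					rows[j].append(i)
-- 		for Lp in (L + 1, L + 2):
-- 			bl2 = buckets.get(Lp)
-- 			if bl2:
-- 				for i in bl:
-- 					wi = lscomp[i]
-- 					for j in bl2:
-- 						if _close(wi, lscomp[j]):
-- 							rows[i].append(j)
-- 							rows[j].append(i)
-- 	for r in rows:
-- 		r.sort()
-- 	return rows
-- ===== Notes on version B (the rewrite author's own statement) =====
-- stated objective: faster
-- what changed: A scans all n^2/2 index pairs and computes the full character-difference count for each; B builds a hash index bucketing indices by string length, enumerates candidate pairs only between length-L and length-L..L+2 buckets (the metric adds the length gap, so no other pair can be close), tests each candidate with an early-exit counter that stops once the difference count exceeds 2, and finally sorts each row to restore A's increasing order.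
import Mathlib
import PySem

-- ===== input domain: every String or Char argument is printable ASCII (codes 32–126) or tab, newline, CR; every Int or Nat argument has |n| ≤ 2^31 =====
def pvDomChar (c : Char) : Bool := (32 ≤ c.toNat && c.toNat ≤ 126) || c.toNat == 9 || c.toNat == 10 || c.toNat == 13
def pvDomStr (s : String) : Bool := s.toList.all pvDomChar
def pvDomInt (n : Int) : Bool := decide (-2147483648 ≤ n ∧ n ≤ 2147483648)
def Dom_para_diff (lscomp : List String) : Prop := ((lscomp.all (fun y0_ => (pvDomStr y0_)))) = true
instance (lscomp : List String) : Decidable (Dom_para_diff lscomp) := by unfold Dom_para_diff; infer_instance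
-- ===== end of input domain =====

-- B replaces A's all-pairs scan by a length-bucket index (only pairs whose lengths differ by at
-- most 2 are compared, each once) with an early-exit difference test; rows are sorted at the end.

-- ===== PORT A =====
def strEqual (word1 word2 : String) : Int :=
  if word1 ≠ word2 then
    (((word1.toList.zip word2.toList).filter (fun p => p.1 != p.2)).length : Int)
      + |(word1.toList.length : Int) - (word2.toList.length : Int)|
  else 0

def para_diff (lscomp : List String) : List (List Int) :=
  let n := lscomp.length
  (List.range n).foldl
    (fun dif i =>
      (List.range' (i+1) (n - (i+1))).foldl
        (fun dif j =>
          let c := strEqual (lscomp.getD i "") (lscomp.getD j "")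
          if c ≤ 2 then
            let dif1 := dif.set i (dif.getD i [] ++ [(j : Int)])
            dif1.set j (dif1.getD j [] ++ [(i : Int)])
          else dif)
        dif)
    ((List.range n).map (fun _ => ([] : List Int)))

-- ===== PORT B =====
-- inner loop of _close(u, v) of Source B (difference counter with early exit past 2)
def closeLoop (d : Int) : List (Char × Char) → Bool
  | [] => true
  | p :: t => if p.1 != p.2 then (if d + 1 > 2 then false else closeLoop (d + 1) t) else closeLoop d t

-- _close(u, v) of Source B
def closeB (u v : String) : Bool :=
  if u == v then true
  else if |(u.toList.length : Int) - (v.toList.length : Int)| > 2 then false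
  else closeLoop (|(u.toList.length : Int) - (v.toList.length : Int)|) (u.toList.zip v.toList)

-- buckets built by the first loop of Source B: length -> list of indices
def bucketsOf (lscomp : List String) : PySem.Dict Int (List Int) :=
  (PySem.List.enumerate lscomp).foldl
    (fun b p => b.modify ((p.2.toList.length : Int)) [] (fun l => l ++ [p.1]))
    PySem.Dict.empty

-- the two appends Source B performs for a candidate pair (i, j) that turns out close
def pairStep (lscomp : List String) (rows : List (List Int)) (p : Int × Int) : List (List Int) :=
  if closeB (PySem.List.pyGetD lscomp p.1 "") (PySem.List.pyGetD lscomp p.2 "") then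
    let r1 := rows.set p.1.toNat (rows.getD p.1.toNat [] ++ [p.2])
    r1.set p.2.toNat (r1.getD p.2.toNat [] ++ [p.1])
  else rows

-- the `for Lp in (L + 1, L + 2)` cross-bucket loop body of Source B
def crossStep (lscomp : List String) (bl : List Int) (rows : List (List Int)) (Lp : Int) : List (List Int) :=
  match (bucketsOf lscomp).get? Lp with
  | none => rows
  | some bl2 =>
    if bl2.isEmpty then rows
    else bl.foldl (fun rows i => bl2.foldl (fun rows j => pairStep lscomp rows (i, j)) rows) rows

-- the `for L, bl in buckets.items()` loop body of Source B
def bucketStep (lscomp : List String) (rows : List (List Int)) (q : Int × List Int) : List (List Int) :=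
  let bl := q.2
  let m := bl.length
  let rows1 := (List.range m).foldl (fun rows x =>
    (List.range' (x+1) (m - (x+1))).foldl (fun rows y =>
      pairStep lscomp rows (bl.getD x 0, bl.getD y 0)) rows) rows
  [q.1 + 1, q.1 + 2].foldl (crossStep lscomp bl) rows1

def para_diff_alt (lscomp : List String) : List (List Int) :=
  (((bucketsOf lscomp).items.foldl (bucketStep lscomp)
      ((List.range lscomp.length).map (fun _ => ([] : List Int)))).map
    (fun r => PySem.List.sorted r (fun x => x) false))

-- ===== PRECONDITION & SPEC =====
def Spec_para_diff (lscomp : List String) (out : List (List Int)) : Prop := out = para_diff_alt lscomp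
instance (lscomp : List String) (out : List (List Int)) : Decidable (Spec_para_diff lscomp out) := by unfold Spec_para_diff; infer_instance

-- ===== CLAIM (what is proved, stated in full; the proofs are below) =====
def Claim_equal_para_diff : Prop := ∀ (lscomp : List String), Dom_para_diff lscomp → Spec_para_diff lscomp (para_diff lscomp)

-- ===== LEMMAS AND PROOFS =====

-- the exact difference count both programs threshold at 2
def diffCount (u v : String) : Int :=
  (((u.toList.zip v.toList).filter (fun p => p.1 != p.2)).length : Int)
    + |(u.toList.length : Int) - (v.toList.length : Int)|

-- the common specification of row i: all close partners in increasing order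
def rowSpec (ls : List String) (i : Nat) : List Int :=
  ((List.range ls.length).filter
      (fun j => j != i && decide (diffCount (ls.getD i "") (ls.getD j "") ≤ 2))).map
    (fun j : Nat => (j : Int))

def rowsSpec (ls : List String) : List (List Int) :=
  (List.range ls.length).map (rowSpec ls)

-- ---------- A-side: para_diff = rowsSpec ----------

def close (ls : List String) (i j : Nat) : Bool :=
  decide (strEqual (ls.getD i "") (ls.getD j "") ≤ 2)

def pdStep (ls : List String) (dif : List (List Int)) (p : Nat × Nat) : List (List Int) :=
  if close ls p.1 p.2 then
    let dif1 := dif.set p.1 (dif.getD p.1 [] ++ [(p.2 : Int)])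
    dif1.set p.2 (dif1.getD p.2 [] ++ [(p.1 : Int)])
  else dif

def lexPairs (n : Nat) : List (Nat × Nat) :=
  (List.range n).flatMap (fun i => (List.range' (i+1) (n - (i+1))).map (fun j => (i, j)))

def partners (ls : List String) (P : List (Nat × Nat)) (k : Nat) : List Int :=
  P.filterMap (fun p =>
    if close ls p.1 p.2 then
      if p.1 = k then some ((p.2 : Int))
      else if p.2 = k then some ((p.1 : Int))
      else none
    else none)

theorem filter_zip_self (l : List Char) : ((l.zip l).filter (fun p => p.1 != p.2)) = [] := by
  induction l with
  | nil => rfl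
  | cons a t ih => simp [ih]

theorem strEqual_eq_diffCount (u v : String) : strEqual u v = diffCount u v := by
  unfold strEqual diffCount
  split
  · rfl
  · rename_i h
    rw [not_not] at h
    subst h
    simp [filter_zip_self]

theorem countNe_comm (l1 l2 : List Char) :
    ((l1.zip l2).filter (fun p => p.1 != p.2)).length
      = ((l2.zip l1).filter (fun p => p.1 != p.2)).length := by
  induction l1 generalizing l2 with
  | nil => cases l2 <;> rfl
  | cons a t ih =>
    cases l2 with
    | nil => rfl
    | cons b t2 =>
      simp only [List.zip_cons_cons, List.filter_cons]
      rw [bne_comm]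
      split <;> simp [ih]

theorem diffCount_comm (u v : String) : diffCount u v = diffCount v u := by
  unfold diffCount
  rw [countNe_comm, abs_sub_comm]

theorem close_comm (ls : List String) (i j : Nat) : close ls i j = close ls j i := by
  unfold close
  rw [strEqual_eq_diffCount, strEqual_eq_diffCount, diffCount_comm]

theorem foldl_flatMap' {α β γ : Type} (g : β → γ → β) (f : α → List γ) (l : List α) (s : β) :
    (l.flatMap f).foldl g s = l.foldl (fun s a => (f a).foldl g s) s := by
  induction l generalizing s with
  | nil => rfl
  | cons a t ih => simp [List.flatMap_cons, List.foldl_append, ih]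

theorem para_diff_eq_foldl (ls : List String) :
    para_diff ls = (lexPairs ls.length).foldl (pdStep ls)
      ((List.range ls.length).map (fun _ => ([] : List Int))) := by
  unfold para_diff lexPairs
  rw [foldl_flatMap']
  simp only [List.foldl_map]
  simp only [pdStep, close, decide_eq_true_eq]

theorem length_pdStep (ls : List String) (s : List (List Int)) (p : Nat × Nat) :
    (pdStep ls s p).length = s.length := by
  unfold pdStep; split <;> simp

theorem length_foldl_pdStep (ls : List String) (P : List (Nat × Nat)) (s : List (List Int)) :
    (P.foldl (pdStep ls) s).length = s.length := by
  induction P generalizing s with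
  | nil => rfl
  | cons p t ih => simp [List.foldl_cons, ih, length_pdStep]

theorem getD_foldl_pdStep (ls : List String) (P : List (Nat × Nat)) (s : List (List Int)) (k : Nat)
    (hP : ∀ p ∈ P, p.1 < s.length ∧ p.2 < s.length ∧ p.1 ≠ p.2) :
    (P.foldl (pdStep ls) s).getD k [] = s.getD k [] ++ partners ls P k := by
  induction P generalizing s with
  | nil => simp [partners]
  | cons p t ih =>
    obtain ⟨h1, h2, h12⟩ := hP p (List.mem_cons_self ..)
    have ht : ∀ q ∈ t, q.1 < (pdStep ls s p).length ∧ q.2 < (pdStep ls s p).length ∧ q.1 ≠ q.2 := by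
      intro q hq; rw [length_pdStep]; exact hP q (List.mem_cons_of_mem _ hq)
    rw [List.foldl_cons, ih _ ht]
    by_cases hc : close ls p.1 p.2 = true
    · by_cases hk1 : p.1 = k
      · subst hk1
        simp [pdStep, partners, hc, h12, Ne.symm h12, List.getD_eq_getElem?_getD, h1]
      · by_cases hk2 : p.2 = k
        · subst hk2
          simp [pdStep, partners, hc, hk1, List.getD_eq_getElem?_getD, h2]
        · simp [pdStep, partners, hc, hk1, hk2, List.getD_eq_getElem?_getD,
            List.getElem?_set]
    · simp [pdStep, partners, hc]

theorem filterMap_eq_single {γ : Type} (l : List Nat) (k : Nat) (o : Option γ)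
    (hl : l.Nodup) :
    l.filterMap (fun j => if j = k then o else none) = if k ∈ l then o.toList else [] := by
  induction l with
  | nil => simp
  | cons a t ih =>
    rw [List.nodup_cons] at hl
    rw [List.filterMap_cons]
    by_cases ha : a = k
    · subst ha
      have : a ∉ t := hl.1
      cases o <;> simp [ih hl.2, this]
    · simp [ha, ih hl.2, Ne.symm ha]

theorem filterMap_if_map {γ : Type} (l : List Nat) (p : Nat → Bool) (f : Nat → γ) :
    l.filterMap (fun j => if p j then some (f j) else none) = (l.filter p).map f := by
  induction l with
  | nil => rfl
  | cons a t ih =>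
    by_cases h : p a = true <;> simp [h, ih]

theorem flatMap_if_map {γ : Type} (l : List Nat) (p : Nat → Bool) (f : Nat → γ) :
    l.flatMap (fun j => if p j then [f j] else []) = (l.filter p).map f := by
  induction l with
  | nil => rfl
  | cons a t ih =>
    by_cases h : p a = true <;>
      simp [List.flatMap_cons, h, ih]

theorem range_split (k n : Nat) (h : k < n) :
    List.range n = List.range k ++ List.range' k (n - k) := by
  have h2 : n = k + (n - k) := by omega
  rw [List.range_eq_range', h2, ← List.range'_append (s := 0) (step := 1) (m := k) (n := n - k)]
  simp [List.range_eq_range']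

theorem partners_lexPairs (ls : List String) (k : Nat) (hk : k < ls.length) :
    partners ls (lexPairs ls.length) k = rowSpec ls k := by
  have hcl : ∀ j, close ls k j = decide (diffCount (ls.getD k "") (ls.getD j "") ≤ 2) := by
    intro j; unfold close; rw [strEqual_eq_diffCount]
  set n := ls.length with hn
  unfold partners lexPairs rowSpec
  rw [List.filterMap_flatMap]
  simp only [List.filterMap_map]
  have hnk : n - k = (n - k - 1) + 1 := by omega
  rw [range_split k n hk, hnk, List.range'_succ, List.flatMap_append, List.flatMap_cons]
  have hblockk :
      (List.range' (k+1) (n - (k+1))).filterMap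
          ((fun p : Nat × Nat =>
            if close ls p.1 p.2 then
              if p.1 = k then some ((p.2 : Int))
              else if p.2 = k then some ((p.1 : Int))
              else none
            else none) ∘ (fun j => (k, j)))
        = ((List.range' (k+1) (n - k - 1)).filter (fun j => close ls k j)).map
            (fun j : Nat => (j : Int)) := by
    rw [← filterMap_if_map]
    apply List.filterMap_congr
    intro j hj
    simp
  have hblockgt :
      (List.range' (k+1) (n - k - 1)).flatMap
          (fun i => (List.range' (i+1) (n - (i+1))).filterMap
            ((fun p : Nat × Nat =>
              if close ls p.1 p.2 then
                if p.1 = k then some ((p.2 : Int))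
                else if p.2 = k then some ((p.1 : Int))
                else none
              else none) ∘ (fun j => (i, j))))
        = [] := by
    apply List.flatMap_eq_nil_iff.mpr
    intro i hi
    rw [List.mem_range'_1] at hi
    apply List.filterMap_eq_nil_iff.mpr
    intro j hj
    rw [List.mem_range'_1] at hj
    have hik : i ≠ k := by omega
    have hjk : j ≠ k := by omega
    simp [hik, hjk]
  have hblocklt :
      (List.range k).flatMap
          (fun i => (List.range' (i+1) (n - (i+1))).filterMap
            ((fun p : Nat × Nat =>
              if close ls p.1 p.2 then
                if p.1 = k then some ((p.2 : Int))
                else if p.2 = k then some ((p.1 : Int))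
                else none
              else none) ∘ (fun j => (i, j))))
        = ((List.range k).filter (fun i => close ls k i)).map (fun i : Nat => (i : Int)) := by
    rw [← flatMap_if_map]
    apply List.flatMap_congr
    intro i hi
    rw [List.mem_range] at hi
    have hik : i ≠ k := by omega
    have heq : ∀ j ∈ List.range' (i+1) (n - (i+1)),
        ((fun p : Nat × Nat =>
          if close ls p.1 p.2 then
            if p.1 = k then some ((p.2 : Int))
            else if p.2 = k then some ((p.1 : Int))
            else none
          else none) ∘ (fun j => (i, j))) j
        = (fun j => if j = k then (if close ls i k then some ((i : Int)) else none) else none) j := by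
      intro j hj
      by_cases hjk : j = k
      · subst hjk; simp [hik]
      · simp [hik, hjk]
    rw [List.filterMap_congr heq, filterMap_eq_single _ _ _ (List.nodup_range' ..)]
    have hmem : k ∈ List.range' (i+1) (n - (i+1)) := by
      rw [List.mem_range'_1]; omega
    rw [if_pos hmem, close_comm ls i k]
    cases h : close ls k i <;> simp
  rw [hblockk, hblockgt, hblocklt, List.append_nil]
  rw [List.filter_append, List.filter_cons, List.map_append]
  have h1 : (List.range k).filter
      (fun j => j != k && decide (diffCount (ls.getD k "") (ls.getD j "") ≤ 2))
      = (List.range k).filter (fun i => close ls k i) := by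
    apply List.filter_congr
    intro j hj
    rw [List.mem_range] at hj
    have : j ≠ k := by omega
    simp [this, hcl]
  have h2 : (List.range' (k+1) (n - k - 1)).filter
      (fun j => j != k && decide (diffCount (ls.getD k "") (ls.getD j "") ≤ 2))
      = (List.range' (k+1) (n - k - 1)).filter (fun j => close ls k j) := by
    apply List.filter_congr
    intro j hj
    rw [List.mem_range'_1] at hj
    have : j ≠ k := by omega
    simp [this, hcl]
  rw [h1, h2]
  simp

theorem mem_lexPairs (n : Nat) (p : Nat × Nat) (hp : p ∈ lexPairs n) :
    p.1 < n ∧ p.2 < n ∧ p.1 ≠ p.2 := by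
  unfold lexPairs at hp
  simp only [List.mem_flatMap, List.mem_map, List.mem_range, List.mem_range'_1] at hp
  obtain ⟨i, hi, j, hj, rfl⟩ := hp
  simp only []
  omega

theorem length_para_diff (ls : List String) : (para_diff ls).length = ls.length := by
  rw [para_diff_eq_foldl, length_foldl_pdStep]
  simp

theorem para_diff_eq_rowsSpec (ls : List String) : para_diff ls = rowsSpec ls := by
  apply List.ext_getElem
  · rw [length_para_diff]
    simp [rowsSpec]
  · intro k h1 h2
    have hk : k < ls.length := by rw [length_para_diff] at h1; exact h1
    have hA : (para_diff ls)[k] = (para_diff ls).getD k [] := by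
      rw [List.getD_eq_getElem]
    rw [hA, para_diff_eq_foldl, getD_foldl_pdStep]
    · have hinit : ((List.range ls.length).map (fun _ => ([] : List Int))).getD k [] = [] := by
        simp [List.getD_eq_getElem?_getD]
      rw [hinit, List.nil_append, partners_lexPairs ls k hk]
      simp [rowsSpec]
    · intro p hp
      have := mem_lexPairs ls.length p hp
      simpa using this

-- ---------- B-side: para_diff_alt = rowsSpec ----------

-- closeB decides `diffCount ≤ 2`
theorem closeLoop_eq (l : List (Char × Char)) (d : Int) (hd : d ≤ 2) :
    closeLoop d l = decide (d + ((l.filter (fun p => p.1 != p.2)).length : Int) ≤ 2) := by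
  induction l generalizing d with
  | nil => simp [closeLoop, hd]
  | cons p t ih =>
    rw [closeLoop, List.filter_cons]
    by_cases hp : (p.1 != p.2) = true
    · rw [if_pos hp, if_pos hp]
      by_cases h3 : d + 1 > 2
      · rw [if_pos h3]
        have hno : ¬ (d + (((p :: (t.filter (fun q => q.1 != q.2))).length : Int)) ≤ 2) := by
          simp only [List.length_cons]
          push_cast
          omega
        exact (decide_eq_false hno).symm
      · rw [if_neg h3, ih (d + 1) (by omega), decide_eq_decide]
        simp only [List.length_cons]
        push_cast
        omega
    · rw [if_neg hp, if_neg hp, ih d hd]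

theorem closeB_eq (u v : String) : closeB u v = decide (diffCount u v ≤ 2) := by
  unfold closeB diffCount
  by_cases he : u = v
  · subst he
    simp [filter_zip_self]
  · have hbe : (u == v) = false := by
      simp [he]
    rw [hbe]
    simp only [Bool.false_eq_true, if_false]
    by_cases h : |(u.toList.length : Int) - (v.toList.length : Int)| > 2
    · rw [if_pos h]
      have hno : ¬ ((((u.toList.zip v.toList).filter (fun p => p.1 != p.2)).length : Int)
          + |(u.toList.length : Int) - (v.toList.length : Int)| ≤ 2) := by
        have := Int.natCast_nonneg (((u.toList.zip v.toList).filter (fun p => p.1 != p.2)).length)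
        omega
      exact (decide_eq_false hno).symm
    · rw [if_neg h, closeLoop_eq _ _ (by omega), decide_eq_decide]
      omega

theorem closeB_comm (u v : String) : closeB u v = closeB v u := by
  rw [closeB_eq, closeB_eq, decide_eq_decide, diffCount_comm]

-- the length of the sentence at an Int index
def lenAt (ls : List String) (x : Int) : Int := ((PySem.List.pyGetD ls x "").toList.length : Int)

-- the bucket for L holds exactly the indices of sentences of length L, in increasing order
theorem bucketsOf_getD (ls : List String) (L : Int) :
    (bucketsOf ls).getD L []
      = (PySem.List.pyRange 0 (PySem.List.len ls)).filter (fun j => lenAt ls j == L) := by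
  unfold bucketsOf
  rw [PySem.List.enumerate_eq_map_pyRange ls ""]
  have hshape :
      ((PySem.List.pyRange 0 (PySem.List.len ls)).map
          (fun j => (j, PySem.List.pyGetD ls j ""))).foldl
        (fun b p => b.modify ((p.2.toList.length : Int)) [] (fun l => l ++ [p.1]))
        PySem.Dict.empty
      = ((PySem.List.pyRange 0 (PySem.List.len ls)).map
          (fun j => (((PySem.List.pyGetD ls j "").toList.length : Int), j))).foldl
        (fun b (p : Int × Int) => b.modify p.1 [] (fun l => l ++ [p.2]))
        PySem.Dict.empty := by
    rw [List.foldl_map, List.foldl_map]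
  rw [hshape, PySem.Dict.getD_foldl_modify_append]
  rw [PySem.Dict.getD_empty, List.nil_append, List.filter_map, List.map_map]
  simp [Function.comp_def, lenAt]

theorem mem_bucketsOf (ls : List String) (L j : Int) :
    j ∈ (bucketsOf ls).getD L []
      ↔ (0 ≤ j ∧ j < (ls.length : Int) ∧ lenAt ls j = L) := by
  rw [bucketsOf_getD, List.mem_filter, PySem.List.mem_pyRange_one]
  simp [PySem.List.len]
  tauto

theorem pairwise_lt_bucket (ls : List String) (L : Int) :
    ((bucketsOf ls).getD L []).Pairwise (· < ·) := by
  rw [bucketsOf_getD]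
  exact (PySem.List.pairwise_lt_pyRange_one _ _).filter _

theorem nodup_bucket (ls : List String) (L : Int) : ((bucketsOf ls).getD L []).Nodup :=
  (pairwise_lt_bucket ls L).imp (fun h => ne_of_lt h)

theorem nodup_keys_bucketsOf (ls : List String) : (bucketsOf ls).keys.Nodup := by
  unfold bucketsOf
  apply PySem.Dict.nodup_keys_foldl_modify_key
  simp [PySem.Dict.keys_empty]

theorem items_snd (ls : List String) (q : Int × List Int) (hq : q ∈ (bucketsOf ls).items) :
    q.2 = (bucketsOf ls).getD q.1 [] := by
  obtain ⟨L, bl⟩ := q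
  exact (PySem.Dict.getD_of_mem_items _ hq (nodup_keys_bucketsOf ls) []).symm

theorem mem_items_bucketsOf (ls : List String) (L : Int)
    (h : (bucketsOf ls).getD L [] ≠ []) :
    (L, (bucketsOf ls).getD L []) ∈ (bucketsOf ls).items := by
  cases hc : (bucketsOf ls).contains L
  · exact absurd (PySem.Dict.getD_of_not_contains _ [] hc) h
  · cases hg : (bucketsOf ls).get? L with
    | none =>
      rw [PySem.Dict.get?_eq_none_iff_contains] at hg
      rw [hc] at hg
      exact absurd hg (by simp)
    | some v =>
      have hv : (bucketsOf ls).getD L [] = v := PySem.Dict.getD_of_get?_eq_some _ [] hg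
      rw [hv]
      exact PySem.Dict.mem_items_of_get?_eq_some _ hg

-- pair lists traversed by Source B's loops
def wPairs (bl : List Int) : List (Int × Int) :=
  (List.range bl.length).flatMap (fun x =>
    (List.range' (x+1) (bl.length - (x+1))).map (fun y => (bl.getD x 0, bl.getD y 0)))

def xPairs (bl bl2 : List Int) : List (Int × Int) :=
  bl.flatMap (fun i => bl2.map (fun j => (i, j)))

def crossPairsAt (ls : List String) (Lp : Int) (bl : List Int) : List (Int × Int) :=
  match (bucketsOf ls).get? Lp with
  | none => []
  | some bl2 => if bl2.isEmpty then [] else xPairs bl bl2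

def blockPairs (ls : List String) (q : Int × List Int) : List (Int × Int) :=
  wPairs q.2 ++ crossPairsAt ls (q.1 + 1) q.2 ++ crossPairsAt ls (q.1 + 2) q.2

def bigPairs (ls : List String) : List (Int × Int) :=
  (bucketsOf ls).items.flatMap (blockPairs ls)

-- the port's nested loops ARE the fold of pairStep over these pair lists
theorem crossStep_eq (ls : List String) (bl : List Int) (rows : List (List Int)) (Lp : Int) :
    crossStep ls bl rows Lp = (crossPairsAt ls Lp bl).foldl (pairStep ls) rows := by
  unfold crossStep crossPairsAt
  cases hg : (bucketsOf ls).get? Lp with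
  | none => rfl
  | some bl2 =>
    by_cases he : bl2.isEmpty
    · simp [he]
    · simp only [he, if_false, Bool.false_eq_true]
      unfold xPairs
      rw [foldl_flatMap']
      simp only [List.foldl_map]

theorem bucketStep_eq (ls : List String) (rows : List (List Int)) (q : Int × List Int) :
    bucketStep ls rows q = (blockPairs ls q).foldl (pairStep ls) rows := by
  unfold bucketStep blockPairs
  rw [List.foldl_append, List.foldl_append]
  rw [List.foldl_cons, List.foldl_cons, List.foldl_nil, crossStep_eq, crossStep_eq]
  congr 2
  unfold wPairs
  rw [foldl_flatMap']
  simp only [List.foldl_map]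

theorem para_diff_alt_eq_fold (ls : List String) :
    para_diff_alt ls
      = (((bigPairs ls).foldl (pairStep ls)
            ((List.range ls.length).map (fun _ => ([] : List Int)))).map
          (fun r => PySem.List.sorted r (fun x => x) false)) := by
  unfold para_diff_alt bigPairs
  rw [foldl_flatMap']
  congr 1
  have hf : bucketStep ls = (fun s a => List.foldl (pairStep ls) s (blockPairs ls a)) := by
    funext rows q
    exact bucketStep_eq ls rows q
  rw [hf]

-- the partners contributed to row k by a list of candidate pairs
def partnersB (ls : List String) (P : List (Int × Int)) (k : Nat) : List Int :=
  P.filterMap (fun p =>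
    if closeB (PySem.List.pyGetD ls p.1 "") (PySem.List.pyGetD ls p.2 "") then
      if p.1 = (k : Int) then some p.2
      else if p.2 = (k : Int) then some p.1
      else none
    else none)

theorem length_pairStep (ls : List String) (rows : List (List Int)) (p : Int × Int) :
    (pairStep ls rows p).length = rows.length := by
  unfold pairStep; split <;> simp

theorem length_foldl_pairStep (ls : List String) (P : List (Int × Int)) (rows : List (List Int)) :
    (P.foldl (pairStep ls) rows).length = rows.length := by
  induction P generalizing rows with
  | nil => rfl
  | cons p t ih => simp [List.foldl_cons, ih, length_pairStep]

theorem getD_set_ne (l : List (List Int)) (i j : Nat) (a : List Int) (h : i ≠ j) :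
    (l.set i a).getD j [] = l.getD j [] := by
  rw [List.getD_eq_getElem?_getD, List.getElem?_set_ne h, ← List.getD_eq_getElem?_getD]

theorem getD_set_self (l : List (List Int)) (j : Nat) (a : List Int) (h : j < l.length) :
    (l.set j a).getD j [] = a := by
  rw [List.getD_eq_getElem?_getD, List.getElem?_set_self h]
  rfl

theorem getD_foldl_pairStep (ls : List String) (P : List (Int × Int)) (rows : List (List Int)) (k : Nat)
    (hP : ∀ p ∈ P, 0 ≤ p.1 ∧ p.1 < (rows.length : Int) ∧ 0 ≤ p.2 ∧ p.2 < (rows.length : Int) ∧ p.1 ≠ p.2) :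
    (P.foldl (pairStep ls) rows).getD k [] = rows.getD k [] ++ partnersB ls P k := by
  induction P generalizing rows with
  | nil => simp [partnersB]
  | cons p t ih =>
    obtain ⟨h10, h1n, h20, h2n, h12⟩ := hP p (List.mem_cons_self ..)
    have ht : ∀ q ∈ t, 0 ≤ q.1 ∧ q.1 < ((pairStep ls rows p).length : Int)
        ∧ 0 ≤ q.2 ∧ q.2 < ((pairStep ls rows p).length : Int) ∧ q.1 ≠ q.2 := by
      intro q hq; rw [length_pairStep]; exact hP q (List.mem_cons_of_mem _ hq)
    rw [List.foldl_cons, ih _ ht]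
    by_cases hc : closeB (PySem.List.pyGetD ls p.1 "") (PySem.List.pyGetD ls p.2 "") = true
    · have hstep : pairStep ls rows p
          = (rows.set p.1.toNat (rows.getD p.1.toNat [] ++ [p.2])).set p.2.toNat
              (((rows.set p.1.toNat (rows.getD p.1.toNat [] ++ [p.2])).getD p.2.toNat []) ++ [p.1]) := by
        unfold pairStep
        rw [if_pos hc]
      by_cases hk1 : p.1 = (k : Int)
      · have hk1' : p.1.toNat = k := by omega
        have hk2' : p.2.toNat ≠ k := by omega
        have hlt1 : k < rows.length := by omega
        have hpart : partnersB ls (p :: t) k = p.2 :: partnersB ls t k := by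
          unfold partnersB
          rw [List.filterMap_cons, if_pos hc, if_pos hk1]
        have hg : (pairStep ls rows p).getD k [] = rows.getD k [] ++ [p.2] := by
          rw [hstep, getD_set_ne _ _ _ _ hk2', hk1', getD_set_self _ _ _ hlt1]
        rw [hg, hpart]
        simp
      · by_cases hk2 : p.2 = (k : Int)
        · have hk2' : p.2.toNat = k := by omega
          have hk1' : p.1.toNat ≠ k := by omega
          have hlt2 : k < rows.length := by omega
          have hpart : partnersB ls (p :: t) k = p.1 :: partnersB ls t k := by
            unfold partnersB
            rw [List.filterMap_cons, if_pos hc, if_neg hk1, if_pos hk2]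
          have hg : (pairStep ls rows p).getD k [] = rows.getD k [] ++ [p.1] := by
            rw [hstep, hk2', getD_set_self, getD_set_ne _ _ _ _ hk1']
            rw [List.length_set]
            exact hlt2
          rw [hg, hpart]
          simp
        · have hk1' : p.1.toNat ≠ k := by omega
          have hk2' : p.2.toNat ≠ k := by omega
          have hpart : partnersB ls (p :: t) k = partnersB ls t k := by
            unfold partnersB
            rw [List.filterMap_cons, if_pos hc, if_neg hk1, if_neg hk2]
          have hg : (pairStep ls rows p).getD k [] = rows.getD k [] := by
            rw [hstep, getD_set_ne _ _ _ _ hk2', getD_set_ne _ _ _ _ hk1']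
          rw [hg, hpart]
    · have hpart : partnersB ls (p :: t) k = partnersB ls t k := by
        unfold partnersB
        rw [List.filterMap_cons, if_neg hc]
      have hg : pairStep ls rows p = rows := by
        unfold pairStep
        rw [if_neg hc]
      rw [hg, hpart]

-- membership in the pair lists
theorem mem_wPairs (bl : List Int) (hbl : bl.Pairwise (· < ·)) (p : Int × Int) :
    p ∈ wPairs bl ↔ (p.1 ∈ bl ∧ p.2 ∈ bl ∧ p.1 < p.2) := by
  obtain ⟨p1, p2⟩ := p
  unfold wPairs
  simp only [List.mem_flatMap, List.mem_map, List.mem_range, List.mem_range'_1, Prod.mk.injEq]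
  constructor
  · rintro ⟨x, hx, y, ⟨hy1, hy2⟩, he1, he2⟩
    have hy : y < bl.length := by omega
    rw [List.getD_eq_getElem _ _ hx] at he1
    rw [List.getD_eq_getElem _ _ hy] at he2
    have hlt : bl[x] < bl[y] := List.pairwise_iff_getElem.mp hbl x y hx hy (by omega)
    subst he1; subst he2
    exact ⟨List.getElem_mem _, List.getElem_mem _, hlt⟩
  · rintro ⟨h1, h2, hlt⟩
    obtain ⟨x, hx, hx'⟩ := List.mem_iff_getElem.mp h1
    obtain ⟨y, hy, hy'⟩ := List.mem_iff_getElem.mp h2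
    have hxy : x < y := by
      rcases lt_trichotomy x y with h | h | h
      · exact h
      · subst h; rw [hx'] at hy'; omega
      · have := List.pairwise_iff_getElem.mp hbl y x hy hx h
        rw [hx', hy'] at this; omega
    refine ⟨x, by omega, y, ⟨by omega, by omega⟩, ?_, ?_⟩
    · rw [List.getD_eq_getElem _ _ hx]; exact hx'
    · rw [List.getD_eq_getElem _ _ hy]; exact hy'

theorem mem_xPairs (bl bl2 : List Int) (p : Int × Int) :
    p ∈ xPairs bl bl2 ↔ (p.1 ∈ bl ∧ p.2 ∈ bl2) := by
  obtain ⟨p1, p2⟩ := p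
  unfold xPairs
  simp only [List.mem_flatMap, List.mem_map, Prod.mk.injEq]
  constructor
  · rintro ⟨i, hi, j, hj, rfl, rfl⟩
    exact ⟨hi, hj⟩
  · rintro ⟨h1, h2⟩
    exact ⟨p1, h1, p2, h2, rfl, rfl⟩

theorem mem_crossPairsAt (ls : List String) (Lp : Int) (bl : List Int) (p : Int × Int) :
    p ∈ crossPairsAt ls Lp bl ↔ (p.1 ∈ bl ∧ p.2 ∈ (bucketsOf ls).getD Lp []) := by
  unfold crossPairsAt
  cases hg : (bucketsOf ls).get? Lp with
  | none =>
    have hemp : (bucketsOf ls).getD Lp [] = [] := by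
      rw [PySem.Dict.get?_eq_none_iff_contains] at hg
      exact PySem.Dict.getD_of_not_contains _ [] hg
    simp [hemp]
  | some bl2 =>
    have hbd : (bucketsOf ls).getD Lp [] = bl2 := PySem.Dict.getD_of_get?_eq_some _ [] hg
    by_cases he : bl2.isEmpty
    · have : bl2 = [] := by simpa using he
      simp [this, hbd]
    · simp only [he, if_false, Bool.false_eq_true, hbd]
      exact mem_xPairs bl bl2 p

-- every pair emitted by a block has its first length equal to the block key
theorem blockPairs_shape (ls : List String) (q : Int × List Int)
    (hq : q ∈ (bucketsOf ls).items) (p : Int × Int) (hp : p ∈ blockPairs ls q) :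
    lenAt ls p.1 = q.1 ∧ q.1 ≤ lenAt ls p.2 ∧ lenAt ls p.2 ≤ q.1 + 2
      ∧ 0 ≤ p.1 ∧ p.1 < (ls.length : Int) ∧ 0 ≤ p.2 ∧ p.2 < (ls.length : Int)
      ∧ (lenAt ls p.1 = lenAt ls p.2 → p.1 < p.2) := by
  have hsnd := items_snd ls q hq
  unfold blockPairs at hp
  rw [List.mem_append, List.mem_append] at hp
  rcases hp with (hw | hc1) | hc2
  · rw [hsnd] at hw
    rw [mem_wPairs _ (pairwise_lt_bucket ls q.1)] at hw
    obtain ⟨h1, h2, hlt⟩ := hw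
    rw [mem_bucketsOf] at h1 h2
    refine ⟨h1.2.2, by omega, by omega, h1.1, h1.2.1, h2.1, h2.2.1, fun _ => hlt⟩
  · rw [hsnd] at hc1
    rw [mem_crossPairsAt] at hc1
    obtain ⟨h1, h2⟩ := hc1
    rw [mem_bucketsOf] at h1 h2
    refine ⟨h1.2.2, by omega, by omega, h1.1, h1.2.1, h2.1, h2.2.1, by omega⟩
  · rw [hsnd] at hc2
    rw [mem_crossPairsAt] at hc2
    obtain ⟨h1, h2⟩ := hc2
    rw [mem_bucketsOf] at h1 h2
    refine ⟨h1.2.2, by omega, by omega, h1.1, h1.2.1, h2.1, h2.2.1, by omega⟩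

theorem bigPairs_shape (ls : List String) (p : Int × Int) (hp : p ∈ bigPairs ls) :
    0 ≤ p.1 ∧ p.1 < (ls.length : Int) ∧ 0 ≤ p.2 ∧ p.2 < (ls.length : Int)
      ∧ lenAt ls p.1 ≤ lenAt ls p.2 ∧ lenAt ls p.2 ≤ lenAt ls p.1 + 2
      ∧ (lenAt ls p.1 = lenAt ls p.2 → p.1 < p.2) ∧ p.1 ≠ p.2 := by
  unfold bigPairs at hp
  rw [List.mem_flatMap] at hp
  obtain ⟨q, hq, hp⟩ := hp
  obtain ⟨hl1, hl2, hl3, h10, h1n, h20, h2n, hmono⟩ := blockPairs_shape ls q hq p hp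
  refine ⟨h10, h1n, h20, h2n, by omega, by omega, hmono, ?_⟩
  intro he
  have := hmono (by rw [he])
  omega

-- completeness: every compatible pair occurs in bigPairs
theorem mem_bigPairs_of (ls : List String) (p : Int × Int)
    (h10 : 0 ≤ p.1) (h1n : p.1 < (ls.length : Int)) (h20 : 0 ≤ p.2) (h2n : p.2 < (ls.length : Int))
    (hcase : (lenAt ls p.1 = lenAt ls p.2 ∧ p.1 < p.2)
      ∨ (lenAt ls p.1 < lenAt ls p.2 ∧ lenAt ls p.2 ≤ lenAt ls p.1 + 2)) :
    p ∈ bigPairs ls := by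
  unfold bigPairs
  rw [List.mem_flatMap]
  have hm1 : p.1 ∈ (bucketsOf ls).getD (lenAt ls p.1) [] := by
    rw [mem_bucketsOf]; exact ⟨h10, h1n, rfl⟩
  have hne : (bucketsOf ls).getD (lenAt ls p.1) [] ≠ [] := List.ne_nil_of_mem hm1
  refine ⟨(lenAt ls p.1, (bucketsOf ls).getD (lenAt ls p.1) []),
    mem_items_bucketsOf ls _ hne, ?_⟩
  unfold blockPairs
  rw [List.mem_append, List.mem_append]
  rcases hcase with ⟨heq, hlt⟩ | ⟨hlt, hle⟩
  · left; left
    rw [mem_wPairs _ (pairwise_lt_bucket ls (lenAt ls p.1))]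
    refine ⟨hm1, ?_, hlt⟩
    rw [mem_bucketsOf]
    exact ⟨h20, h2n, heq.symm⟩
  · have hm2 : p.2 ∈ (bucketsOf ls).getD (lenAt ls p.2) [] := by
      rw [mem_bucketsOf]; exact ⟨h20, h2n, rfl⟩
    rcases (by omega : lenAt ls p.2 = lenAt ls p.1 + 1 ∨ lenAt ls p.2 = lenAt ls p.1 + 2) with h | h
    · left; right
      rw [mem_crossPairsAt]
      exact ⟨hm1, by rw [← h]; exact hm2⟩
    · right
      rw [mem_crossPairsAt]
      exact ⟨hm1, by rw [← h]; exact hm2⟩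

-- each unordered pair occurs at most once
def samePair (p q : Int × Int) : Prop := (q.1 = p.1 ∧ q.2 = p.2) ∨ (q.1 = p.2 ∧ q.2 = p.1)

theorem pairwise_flatMap_of {α β : Type} (f : α → List β) (l : List α) (R : β → β → Prop)
    (h1 : ∀ a ∈ l, (f a).Pairwise R)
    (h2 : l.Pairwise (fun a b => ∀ x ∈ f a, ∀ y ∈ f b, R x y)) :
    (l.flatMap f).Pairwise R := by
  induction l with
  | nil => simp
  | cons a t ih =>
    rw [List.flatMap_cons, List.pairwise_append]
    obtain ⟨hh, ht⟩ := List.pairwise_cons.mp h2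
    refine ⟨h1 a (List.mem_cons_self ..), ih (fun b hb => h1 b (List.mem_cons_of_mem _ hb)) ht, ?_⟩
    intro x hx y hy
    rw [List.mem_flatMap] at hy
    obtain ⟨b, hb, hyb⟩ := hy
    exact hh b hb x hx y hyb

theorem nodup_filterMap_of {α β : Type} (f : α → Option β) (l : List α)
    (h : l.Pairwise (fun p q => ∀ x, f p = some x → f q ≠ some x)) :
    (l.filterMap f).Nodup := by
  induction l with
  | nil => simp
  | cons a t ih =>
    rw [List.filterMap_cons]
    obtain ⟨hh, ht⟩ := List.pairwise_cons.mp h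
    cases hfa : f a with
    | none => exact ih ht
    | some v =>
      refine List.nodup_cons.mpr ⟨?_, ih ht⟩
      intro hmem
      rw [List.mem_filterMap] at hmem
      obtain ⟨q, hq, hfq⟩ := hmem
      exact hh q hq v hfa hfq

theorem pairwise_notSame_of {w : List (Int × Int)} (S : Int × Int → Prop)
    (hnd : w.Nodup) (hS : ∀ p ∈ w, S p)
    (hkey : ∀ p q, S p → S q → samePair p q → q = p) :
    w.Pairwise (fun p q => ¬ samePair p q) := by
  refine hnd.imp_of_mem ?_
  intro p q hp hq hne hsame
  exact hne (hkey p q (hS p hp) (hS q hq) hsame).symm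

theorem nodup_wPairs (bl : List Int) (hbl : bl.Pairwise (· < ·)) : (wPairs bl).Nodup := by
  have hnd : bl.Nodup := hbl.imp (fun h => ne_of_lt h)
  unfold wPairs
  rw [List.nodup_flatMap]
  constructor
  · intro x hx
    rw [List.mem_range] at hx
    rw [List.Nodup, List.pairwise_map]
    refine (List.pairwise_lt_range' 1).imp_of_mem ?_
    intro y y' hy hy' hlt
    rw [List.mem_range'_1] at hy hy'
    have hy2 : y < bl.length := by omega
    have hy2' : y' < bl.length := by omega
    intro hcon
    rw [Prod.mk.injEq, List.getD_eq_getElem _ _ hy2, List.getD_eq_getElem _ _ hy2'] at hcon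
    have := List.pairwise_iff_getElem.mp hbl y y' hy2 hy2' hlt
    omega
  · refine List.pairwise_lt_range.imp_of_mem ?_
    intro x x' hx hx' hlt
    rw [List.mem_range] at hx hx'
    intro a ha ha'
    rw [List.mem_map] at ha ha'
    obtain ⟨y, hy, hay⟩ := ha
    obtain ⟨y', hy', hay'⟩ := ha'
    have h1 : a.1 = bl.getD x 0 := by rw [← hay]
    have h1' : a.1 = bl.getD x' 0 := by rw [← hay']
    rw [List.getD_eq_getElem _ _ hx] at h1
    rw [List.getD_eq_getElem _ _ hx'] at h1'
    have := List.pairwise_iff_getElem.mp hbl x x' hx hx' hlt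
    omega

theorem nodup_xPairs (bl bl2 : List Int) (h1 : bl.Nodup) (h2 : bl2.Nodup) :
    (xPairs bl bl2).Nodup := by
  unfold xPairs
  rw [List.nodup_flatMap]
  constructor
  · intro i _
    rw [List.Nodup, List.pairwise_map]
    exact h2.imp (fun hne hcon => hne (by rw [Prod.mk.injEq] at hcon; exact hcon.2))
  · refine h1.imp_of_mem ?_
    intro i i' _ _ hne a ha ha'
    rw [List.mem_map] at ha ha'
    obtain ⟨j, _, haj⟩ := ha
    obtain ⟨j', _, haj'⟩ := ha'
    apply hne
    rw [← haj] at haj'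
    rw [Prod.mk.injEq] at haj'
    exact haj'.1.symm

theorem lenAt_of_mem_wPairs (ls : List String) (L : Int) (p : Int × Int)
    (hp : p ∈ wPairs ((bucketsOf ls).getD L [])) :
    lenAt ls p.1 = L ∧ lenAt ls p.2 = L ∧ p.1 < p.2 := by
  rw [mem_wPairs _ (pairwise_lt_bucket ls L)] at hp
  obtain ⟨h1, h2, hlt⟩ := hp
  rw [mem_bucketsOf] at h1 h2
  exact ⟨h1.2.2, h2.2.2, hlt⟩

theorem lenAt_of_mem_crossPairsAt (ls : List String) (L Lp : Int) (p : Int × Int)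
    (hp : p ∈ crossPairsAt ls Lp ((bucketsOf ls).getD L [])) :
    lenAt ls p.1 = L ∧ lenAt ls p.2 = Lp := by
  rw [mem_crossPairsAt] at hp
  obtain ⟨h1, h2⟩ := hp
  rw [mem_bucketsOf] at h1 h2
  exact ⟨h1.2.2, h2.2.2⟩

theorem nodup_crossPairsAt (ls : List String) (Lp L : Int) :
    (crossPairsAt ls Lp ((bucketsOf ls).getD L [])).Nodup := by
  unfold crossPairsAt
  cases hg : (bucketsOf ls).get? Lp with
  | none => simp
  | some bl2 =>
    have hbd : (bucketsOf ls).getD Lp [] = bl2 := PySem.Dict.getD_of_get?_eq_some _ [] hg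
    by_cases he : bl2.isEmpty
    · simp [he]
    · simp only [he, if_false, Bool.false_eq_true]
      exact nodup_xPairs _ _ (nodup_bucket ls L) (hbd ▸ nodup_bucket ls Lp)

theorem pairwise_notSame_blockPairs (ls : List String) (q : Int × List Int)
    (hq : q ∈ (bucketsOf ls).items) :
    (blockPairs ls q).Pairwise (fun p p' => ¬ samePair p p') := by
  have hsnd := items_snd ls q hq
  unfold blockPairs
  rw [hsnd, List.pairwise_append, List.pairwise_append]
  have hw := fun p (hp : p ∈ wPairs ((bucketsOf ls).getD q.1 [])) =>
    lenAt_of_mem_wPairs ls q.1 p hp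
  have hc1 := fun p (hp : p ∈ crossPairsAt ls (q.1+1) ((bucketsOf ls).getD q.1 [])) =>
    lenAt_of_mem_crossPairsAt ls q.1 (q.1+1) p hp
  have hc2 := fun p (hp : p ∈ crossPairsAt ls (q.1+2) ((bucketsOf ls).getD q.1 [])) =>
    lenAt_of_mem_crossPairsAt ls q.1 (q.1+2) p hp
  refine ⟨⟨?_, ?_, ?_⟩, ?_, ?_⟩
  · refine pairwise_notSame_of (fun p => p.1 < p.2)
      (nodup_wPairs _ (pairwise_lt_bucket ls q.1)) (fun p hp => (hw p hp).2.2) ?_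
    intro p p' hsp hsp' hs
    unfold samePair at hs
    rcases hs with ⟨e1, e2⟩ | ⟨e1, e2⟩
    · exact Prod.ext e1 e2
    · exfalso; omega
  · refine pairwise_notSame_of (fun p => lenAt ls p.1 < lenAt ls p.2)
      (nodup_crossPairsAt ls (q.1+1) q.1) (fun p hp => by have := hc1 p hp; omega) ?_
    intro p p' hsp hsp' hs
    unfold samePair at hs
    rcases hs with ⟨e1, e2⟩ | ⟨e1, e2⟩
    · exact Prod.ext e1 e2
    · exfalso
      have g1 := congrArg (lenAt ls) e1
      have g2 := congrArg (lenAt ls) e2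
      omega
  · intro p hp p' hp' hs
    have a1 := hw p hp
    have a2 := hc1 p' hp'
    unfold samePair at hs
    rcases hs with ⟨e1, e2⟩ | ⟨e1, e2⟩
    · have g1 := congrArg (lenAt ls) e1
      have g2 := congrArg (lenAt ls) e2
      omega
    · have g1 := congrArg (lenAt ls) e1
      have g2 := congrArg (lenAt ls) e2
      omega
  · refine pairwise_notSame_of (fun p => lenAt ls p.1 < lenAt ls p.2)
      (nodup_crossPairsAt ls (q.1+2) q.1) (fun p hp => by have := hc2 p hp; omega) ?_
    intro p p' hsp hsp' hs
    unfold samePair at hs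
    rcases hs with ⟨e1, e2⟩ | ⟨e1, e2⟩
    · exact Prod.ext e1 e2
    · exfalso
      have g1 := congrArg (lenAt ls) e1
      have g2 := congrArg (lenAt ls) e2
      omega
  · intro p hp p'' hp''
    have a3 := hc2 p'' hp''
    rcases List.mem_append.mp hp with hpw | hpc
    · have a1 := hw p hpw
      intro hs
      unfold samePair at hs
      rcases hs with ⟨e1, e2⟩ | ⟨e1, e2⟩
      · have g1 := congrArg (lenAt ls) e1
        have g2 := congrArg (lenAt ls) e2
        omega
      · have g1 := congrArg (lenAt ls) e1
        have g2 := congrArg (lenAt ls) e2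
        omega
    · have a1 := hc1 p hpc
      intro hs
      unfold samePair at hs
      rcases hs with ⟨e1, e2⟩ | ⟨e1, e2⟩
      · have g1 := congrArg (lenAt ls) e1
        have g2 := congrArg (lenAt ls) e2
        omega
      · have g1 := congrArg (lenAt ls) e1
        have g2 := congrArg (lenAt ls) e2
        omega

theorem pairwise_notSame_bigPairs (ls : List String) :
    (bigPairs ls).Pairwise (fun p p' => ¬ samePair p p') := by
  unfold bigPairs
  apply pairwise_flatMap_of
  · exact fun q hq => pairwise_notSame_blockPairs ls q hq
  · have hnd : ((bucketsOf ls).items.map (fun q => q.1)).Nodup := nodup_keys_bucketsOf ls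
    have hkeys : (bucketsOf ls).items.Pairwise (fun a b => a.1 ≠ b.1) :=
      (List.pairwise_map).mp hnd
    refine hkeys.imp_of_mem ?_
    intro q q' hq hq' hne p hp p' hp' hs
    obtain ⟨e1, e2, e3, _⟩ := blockPairs_shape ls q hq p hp
    obtain ⟨f1, f2, f3, _⟩ := blockPairs_shape ls q' hq' p' hp'
    unfold samePair at hs
    rcases hs with ⟨g1, g2⟩ | ⟨g1, g2⟩
    · apply hne
      have := congrArg (lenAt ls) g1
      omega
    · apply hne
      have h1 := congrArg (lenAt ls) g1
      have h2 := congrArg (lenAt ls) g2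
      omega

-- characterising the entries of row k
theorem partnersB_some_cases (ls : List String) (k : Nat) (p : Int × Int) (x : Int)
    (hf : (if closeB (PySem.List.pyGetD ls p.1 "") (PySem.List.pyGetD ls p.2 "") then
      if p.1 = (k : Int) then some p.2
      else if p.2 = (k : Int) then some p.1
      else none
    else none) = some x) :
    closeB (PySem.List.pyGetD ls p.1 "") (PySem.List.pyGetD ls p.2 "") = true
      ∧ ((p.1 = (k : Int) ∧ p.2 = x) ∨ (p.1 ≠ (k : Int) ∧ p.2 = (k : Int) ∧ p.1 = x)) := by
  by_cases hc : closeB (PySem.List.pyGetD ls p.1 "") (PySem.List.pyGetD ls p.2 "") = true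
  · rw [if_pos hc] at hf
    refine ⟨hc, ?_⟩
    by_cases h1 : p.1 = (k : Int)
    · rw [if_pos h1] at hf
      exact Or.inl ⟨h1, by injection hf⟩
    · rw [if_neg h1] at hf
      by_cases h2 : p.2 = (k : Int)
      · rw [if_pos h2] at hf
        exact Or.inr ⟨h1, h2, by injection hf⟩
      · rw [if_neg h2] at hf
        exact absurd hf (by simp)
  · rw [if_neg hc] at hf
    exact absurd hf (by simp)

theorem nodup_partnersB (ls : List String) (k : Nat) :
    (partnersB ls (bigPairs ls) k).Nodup := by
  unfold partnersB
  apply nodup_filterMap_of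
  refine (pairwise_notSame_bigPairs ls).imp ?_
  intro p q hns x hfp hfq
  obtain ⟨_, hp⟩ := partnersB_some_cases ls k p x hfp
  obtain ⟨_, hq⟩ := partnersB_some_cases ls k q x hfq
  apply hns
  unfold samePair
  rcases hp with ⟨a1, a2⟩ | ⟨_, a1, a2⟩ <;> rcases hq with ⟨b1, b2⟩ | ⟨_, b1, b2⟩
  · left; constructor <;> omega
  · right; constructor <;> omega
  · right; constructor <;> omega
  · left; constructor <;> omega

theorem mem_partnersB (ls : List String) (k : Nat) (hk : k < ls.length) (x : Int) :
    x ∈ partnersB ls (bigPairs ls) k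
      ↔ (0 ≤ x ∧ x < (ls.length : Int) ∧ x ≠ (k : Int)
          ∧ diffCount (ls.getD k "") (PySem.List.pyGetD ls x "") ≤ 2) := by
  have hgk : PySem.List.pyGetD ls ((k : Nat) : Int) "" = ls.getD k "" := by
    rw [PySem.List.pyGetD_of_nonneg _ _ (Int.natCast_nonneg k)]
    simp
  unfold partnersB
  rw [List.mem_filterMap]
  constructor
  · rintro ⟨p, hp, hf⟩
    obtain ⟨hc, hcase⟩ := partnersB_some_cases ls k p x hf
    obtain ⟨h10, h1n, h20, h2n, _, _, _, h12⟩ := bigPairs_shape ls p hp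
    rw [closeB_eq, decide_eq_true_eq] at hc
    rcases hcase with ⟨e1, e2⟩ | ⟨_, e1, e2⟩
    · subst e2
      rw [e1, hgk] at hc
      exact ⟨h20, h2n, by omega, hc⟩
    · subst e2
      rw [e1, hgk] at hc
      rw [diffCount_comm] at hc
      exact ⟨h10, h1n, by omega, hc⟩
  · rintro ⟨hx0, hxn, hxk, hd⟩
    have hlen : |lenAt ls ((k : Nat) : Int) - lenAt ls x| ≤ 2 := by
      unfold diffCount at hd
      have := Int.natCast_nonneg (((ls.getD k "").toList.zip (PySem.List.pyGetD ls x "").toList).filter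
        (fun p => p.1 != p.2)).length
      unfold lenAt
      rw [hgk]
      have h2 : |((ls.getD k "").toList.length : Int) - ((PySem.List.pyGetD ls x "").toList.length : Int)| ≤ 2 := by
        rcases abs_cases (((ls.getD k "").toList.length : Int) - ((PySem.List.pyGetD ls x "").toList.length : Int)) with ⟨he, _⟩ | ⟨he, _⟩ <;> omega
      exact h2
    have hcB : closeB (ls.getD k "") (PySem.List.pyGetD ls x "") = true := by
      rw [closeB_eq, decide_eq_true_eq]; exact hd
    have hk0 : (0 : Int) ≤ (k : Int) := Int.natCast_nonneg k
    have hkn : ((k : Nat) : Int) < (ls.length : Int) := by exact_mod_cast hk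
    rcases lt_trichotomy (lenAt ls ((k : Nat) : Int)) (lenAt ls x) with hl | hl | hl
    · -- k's sentence is shorter: pair (k, x)
      refine ⟨((k : Int), x), mem_bigPairs_of ls _ hk0 hkn hx0 hxn ?_, ?_⟩
      · dsimp only
        right
        refine ⟨hl, ?_⟩
        rcases abs_cases (lenAt ls ((k:Nat):Int) - lenAt ls x) with ⟨he, _⟩ | ⟨he, _⟩ <;> omega
      · dsimp only
        rw [hgk, hcB]
        simp
    · -- equal lengths: the increasing orientation
      rcases lt_trichotomy ((k : Int)) x with ho | ho | ho
      · refine ⟨((k : Int), x), mem_bigPairs_of ls _ hk0 hkn hx0 hxn (Or.inl ⟨hl, ho⟩), ?_⟩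
        dsimp only
        rw [hgk, hcB]
        simp
      · exact absurd ho.symm hxk
      · refine ⟨(x, (k : Int)), mem_bigPairs_of ls _ hx0 hxn hk0 hkn (Or.inl ⟨hl.symm, ho⟩), ?_⟩
        dsimp only
        have hcB' : closeB (PySem.List.pyGetD ls x "") (PySem.List.pyGetD ls ((k:Nat):Int) "") = true := by
          rw [closeB_comm, hgk]; exact hcB
        rw [hcB']
        simp [hxk]
    · -- x's sentence is shorter: pair (x, k)
      refine ⟨(x, (k : Int)), mem_bigPairs_of ls _ hx0 hxn hk0 hkn ?_, ?_⟩
      · dsimp only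
        right
        refine ⟨hl, ?_⟩
        rcases abs_cases (lenAt ls ((k:Nat):Int) - lenAt ls x) with ⟨he, _⟩ | ⟨he, _⟩ <;> omega
      · dsimp only
        have hcB' : closeB (PySem.List.pyGetD ls x "") (PySem.List.pyGetD ls ((k:Nat):Int) "") = true := by
          rw [closeB_comm, hgk]; exact hcB
        rw [hcB']
        simp [hxk]

-- rowSpec k is strictly increasing and characterises the same set
theorem pairwise_lt_rowSpec (ls : List String) (i : Nat) :
    (rowSpec ls i).Pairwise (· < ·) := by
  unfold rowSpec
  rw [List.pairwise_map]
  apply List.Pairwise.filter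
  have := List.pairwise_lt_range (n := ls.length)
  exact this.imp (fun h => by exact_mod_cast h)

theorem mem_rowSpec (ls : List String) (i : Nat) (j : Int) :
    j ∈ rowSpec ls i
      ↔ (0 ≤ j ∧ j < (ls.length : Int) ∧ j ≠ (i : Int)
          ∧ diffCount (ls.getD i "") (PySem.List.pyGetD ls j "") ≤ 2) := by
  unfold rowSpec
  rw [List.mem_map]
  constructor
  · rintro ⟨k, hk, rfl⟩
    rw [List.mem_filter, List.mem_range] at hk
    obtain ⟨hkn, hp⟩ := hk
    simp only [Bool.and_eq_true, bne_iff_ne, decide_eq_true_eq] at hp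
    refine ⟨Int.natCast_nonneg _, by exact_mod_cast hkn, ?_, ?_⟩
    · exact_mod_cast hp.1
    · rw [PySem.List.pyGetD_of_nonneg _ _ (Int.natCast_nonneg k)]
      simpa using hp.2
  · rintro ⟨h0, hn, hne, hd⟩
    refine ⟨j.toNat, ?_, ?_⟩
    · rw [List.mem_filter, List.mem_range]
      constructor
      · omega
      · simp only [Bool.and_eq_true, bne_iff_ne, decide_eq_true_eq]
        constructor
        · intro h; apply hne; subst h; omega
        · rw [PySem.List.pyGetD_of_nonneg _ _ h0] at hd
          exact hd
    · omega

theorem para_diff_alt_eq_rowsSpec (ls : List String) : para_diff_alt ls = rowsSpec ls := by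
  rw [para_diff_alt_eq_fold]
  have hval : ∀ p ∈ bigPairs ls,
      0 ≤ p.1 ∧ p.1 < ((((List.range ls.length).map (fun _ => ([] : List Int)))).length : Int)
        ∧ 0 ≤ p.2 ∧ p.2 < ((((List.range ls.length).map (fun _ => ([] : List Int)))).length : Int)
        ∧ p.1 ≠ p.2 := by
    intro p hp
    obtain ⟨h10, h1n, h20, h2n, _, _, _, h12⟩ := bigPairs_shape ls p hp
    simpa using ⟨h10, h1n, h20, h2n, h12⟩
  apply List.ext_getElem
  · rw [List.length_map, length_foldl_pairStep]
    simp [rowsSpec]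
  · intro k h1 h2
    have hk : k < ls.length := by
      rw [List.length_map, length_foldl_pairStep] at h1
      simpa using h1
    have hklt : k < ((bigPairs ls).foldl (pairStep ls)
        ((List.range ls.length).map (fun _ => ([] : List Int)))).length := by
      rw [length_foldl_pairStep]; simpa using hk
    rw [List.getElem_map]
    have hrow : ((bigPairs ls).foldl (pairStep ls)
        ((List.range ls.length).map (fun _ => ([] : List Int))))[k]
        = partnersB ls (bigPairs ls) k := by
      rw [← List.getD_eq_getElem _ [] hklt, getD_foldl_pairStep ls _ _ k hval]
      have hinit : ((List.range ls.length).map (fun _ => ([] : List Int))).getD k [] = [] := by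
        simp [List.getD_eq_getElem?_getD]
      rw [hinit, List.nil_append]
    rw [hrow]
    have hperm : (rowSpec ls k).Perm (partnersB ls (bigPairs ls) k) := by
      refine (List.perm_ext_iff_of_nodup
        ((pairwise_lt_rowSpec ls k).imp (fun h => ne_of_lt h)) (nodup_partnersB ls k)).mpr ?_
      intro a
      rw [mem_rowSpec, mem_partnersB ls k hk]
    have : PySem.List.sorted (partnersB ls (bigPairs ls) k) (fun x => x) false = rowSpec ls k :=
      PySem.List.sorted_eq_of_perm_of_pairwise_lt _ _ _ hperm (pairwise_lt_rowSpec ls k)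
    rw [this]
    simp [rowsSpec, hk]


-- ===== VERDICT (by name: the statement is the Claim_ definition above) =====
theorem para_diff_spec : Claim_equal_para_diff := by
  intro ls _
  unfold Spec_para_diff
  rw [para_diff_eq_rowsSpec, para_diff_alt_eq_rowsSpec]
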